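-- pv_equiv track=rewrite | github.com/sockduct/Weekly | codewars-wk6-2.py | game2
-- ===== SOURCE A (Python) =====
-- from functools import reduce
-- from itertools import repeat
-- from math import gcd
--
-- def game2(n):
--     numerator = 0
--     denominator = 1
--
--     for row_denom in range(1, n + 1):
--         # row = [Fraction(col_num, row_denom + col_num) for col_num in range(1, n + 1)]
--         cur_row_nums = [col_num for col_num in range(1, n + 1)]
--         cur_row_denoms = [row_denom + col_num for col_num in range(1, n + 1)]
--         lmult = reduce(lcm, cur_row_denoms)
--         cur_row_lcm = repeat(lmult, n)
--         cur_row_pairs = map(lambda ndl: (ndl[0] * (ndl[2]//ndl[1]), ndl[2]), zip(cur_row_nums, cur_row_denoms, cur_row_lcm))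
--         cur_row_pair = reduce(lambda f1, f2: (f1[0] + f2[0], f1[1]), cur_row_pairs)
--         numerator, denominator = add_fractions(numerator, denominator, cur_row_pair[0], cur_row_pair[1])
--
--     divisor = gcd(numerator, denominator)
--     if divisor > 1:
--         numerator //= divisor
--         denominator //= divisor
--
--     if numerator == 0 or denominator == 1:
--         return [numerator]
--     else:
--         return [numerator, denominator]
--
-- def lcm(a, b):
--     return (a * b)//gcd(a, b)
--
-- def add_fractions(num1, denom1, num2, denom2):
--     lmult = lcm(denom1, denom2)
--
--     new_denom = lmult
--     new_num = num1 * (lmult//denom1)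
--     new_num += (num2 * (lmult//denom2))
--
--     return new_num, new_denom
-- ===== SOURCE B (Python) =====
-- def game2(n):
--     # Pairing the cells (i, j) and (j, i) gives j/(i+j) + i/(j+i) = 1, so the
--     # n*n cells sum to exactly n*n/2; reduce that single fraction.
--     if n <= 0:
--         return [0]
--     if n % 2 == 0:
--         return [n * n // 2]
--     return [n * n, 2]
-- ===== Notes on version B (the rewrite author's own statement) =====
-- stated objective: faster
-- what changed: Replaced the O(n^2) row-by-row LCM fraction summation with the closed form n^2/2 (by the symmetry f(i,j)+f(j,i)=1), returned directly in reduced form.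
import Mathlib
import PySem

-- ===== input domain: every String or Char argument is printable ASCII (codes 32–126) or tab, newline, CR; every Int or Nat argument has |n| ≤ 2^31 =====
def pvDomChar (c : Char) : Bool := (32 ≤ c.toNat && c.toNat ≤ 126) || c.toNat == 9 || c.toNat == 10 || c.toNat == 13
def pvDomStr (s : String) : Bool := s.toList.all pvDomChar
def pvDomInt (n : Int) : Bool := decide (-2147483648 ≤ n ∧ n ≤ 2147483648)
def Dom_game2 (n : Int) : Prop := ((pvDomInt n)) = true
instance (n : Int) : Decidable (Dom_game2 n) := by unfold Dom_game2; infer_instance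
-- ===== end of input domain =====

-- B replaces A's O(n^2) row-by-row LCM fraction summation by the closed form n^2/2
-- (symmetry j/(i+j) + i/(j+i) = 1), returned directly in reduced form: asymptotically faster.

-- ===== PORT A =====
-- helper 'lcm' of A
def pvLcm (a b : Int) : Int := PySem.Int.floordiv (a * b) (Int.gcd a b)

-- helper 'add_fractions' of A
def pvAddFractions (num1 denom1 num2 denom2 : Int) : Int × Int :=
  let lmult := pvLcm denom1 denom2
  (num1 * PySem.Int.floordiv lmult denom1 + num2 * PySem.Int.floordiv lmult denom2, lmult)

-- the body of A's 'for row_denom in range(1, n + 1)' loop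
def pvRowBody (n : Int) (acc : Int × Int) (rowDenom : Int) : Int × Int :=
  let curRowNums := (PySem.List.pyRange 1 (n + 1) 1).map (fun colNum => colNum)
  let curRowDenoms := (PySem.List.pyRange 1 (n + 1) 1).map (fun colNum => rowDenom + colNum)
  let lmult := match curRowDenoms with
    | [] => 0  -- unreachable: Python's reduce raises on an empty list; the loop body runs only when n ≥ 1
    | d :: ds => ds.foldl pvLcm d
  let curRowPairs := (curRowNums.zip (curRowDenoms.zip (List.replicate n.toNat lmult))).map
    (fun ndl => (ndl.1 * PySem.Int.floordiv ndl.2.2 ndl.2.1, ndl.2.2))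
  let curRowPair := match curRowPairs with
    | [] => ((0 : Int), (0 : Int))  -- unreachable likewise
    | p :: ps => ps.foldl (fun (f1 f2 : Int × Int) => (f1.1 + f2.1, f1.2)) p
  pvAddFractions acc.1 acc.2 curRowPair.1 curRowPair.2

def game2 (n : Int) : List Int :=
  let r := (PySem.List.pyRange 1 (n + 1) 1).foldl (pvRowBody n) (0, 1)
  let divisor : Int := Int.gcd r.1 r.2
  let numerator := if divisor > 1 then PySem.Int.floordiv r.1 divisor else r.1
  let denominator := if divisor > 1 then PySem.Int.floordiv r.2 divisor else r.2
  if numerator = 0 ∨ denominator = 1 then [numerator] else [numerator, denominator]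

-- ===== PORT B =====
def game2_alt (n : Int) : List Int :=
  if n ≤ 0 then [0]
  else if PySem.Int.mod n 2 = 0 then [PySem.Int.floordiv (n * n) 2]
  else [n * n, 2]

-- ===== PRECONDITION & SPEC =====
def Spec_game2 (n : Int) (out : List Int) : Prop := out = game2_alt n
instance (n : Int) (out : List Int) : Decidable (Spec_game2 n out) := by unfold Spec_game2; infer_instance

-- ===== CLAIM (what is proved, stated in full; the proofs are below) =====
def Claim_equal_game2 : Prop := ∀ (n : Int), Dom_game2 n → Spec_game2 n (game2 n)

-- ===== LEMMAS AND PROOFS =====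

theorem pvLcm_pos_dvd (a b : Int) (ha : 0 < a) (hb : 0 < b) :
    0 < pvLcm a b ∧ a ∣ pvLcm a b ∧ b ∣ pvLcm a b := by
  have hg0 : Int.gcd a b ≠ 0 := by
    simp only [ne_eq, Int.gcd_eq_zero_iff, not_and]
    intro h; omega
  have hg : (0 : Int) < (Int.gcd a b : Int) := by exact_mod_cast Nat.pos_of_ne_zero hg0
  obtain ⟨a', ha'⟩ := Int.gcd_dvd_left (a := a) (b := b)
  obtain ⟨b', hb'⟩ := Int.gcd_dvd_right (a := a) (b := b)
  have e1 : a * b = (Int.gcd a b : Int) * (a' * b) := by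
    conv_lhs => rw [ha']
    ring
  have e2 : a * b = (Int.gcd a b : Int) * (a * b') := by
    conv_lhs => rw [hb']
    ring
  unfold pvLcm
  rw [PySem.Int.floordiv_eq_ediv_of_pos hg]
  refine ⟨?_, ?_, ?_⟩
  · rw [e1, Int.mul_ediv_cancel_left _ hg.ne']
    have ha'' : 0 < a' := by nlinarith
    exact mul_pos ha'' hb
  · rw [e2, Int.mul_ediv_cancel_left _ hg.ne']
    exact Dvd.intro b' rfl
  · rw [e1, Int.mul_ediv_cancel_left _ hg.ne']
    exact Dvd.intro_left a' rfl

theorem foldl_pvLcm (t : List Int) : ∀ (a : Int), 0 < a → (∀ x ∈ t, 0 < x) →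
    0 < t.foldl pvLcm a ∧ a ∣ t.foldl pvLcm a ∧ ∀ x ∈ t, x ∣ t.foldl pvLcm a := by
  induction t with
  | nil => intro a ha _; exact ⟨ha, dvd_refl a, by simp⟩
  | cons x t ih =>
    intro a ha hpos
    have hx : 0 < x := hpos x (by simp)
    obtain ⟨hL, haL, hxL⟩ := pvLcm_pos_dvd a x ha hx
    obtain ⟨h1, h2, h3⟩ := ih (pvLcm a x) hL (fun y hy => hpos y (by simp [hy]))
    refine ⟨h1, dvd_trans haL h2, ?_⟩
    intro y hy
    rcases List.mem_cons.1 hy with rfl | hy'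
    · exact dvd_trans hxL h2
    · exact h3 y hy' 

theorem pairFold (t : List (Int × Int)) : ∀ p : Int × Int,
    t.foldl (fun f1 f2 => (f1.1 + f2.1, f1.2)) p = (p.1 + (t.map Prod.fst).sum, p.2) := by
  induction t with
  | nil => intro p; simp
  | cons x t ih =>
    intro p
    rw [List.foldl_cons, ih]
    simp [add_assoc]

theorem zip3_map {α β γ δ : Type} (l : List α) (g : α → β) (c : γ) (h : α × β × γ → δ) :
    (l.zip ((l.map g).zip (List.replicate l.length c))).map h
      = l.map (fun x => h (x, g x, c)) := by
  induction l with
  | nil => simp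
  | cons x t ih => simp [List.replicate_succ, ih]

theorem addFrac_val (N D S L : Int) (hD : 0 < D) (hL : 0 < L) :
    0 < (pvAddFractions N D S L).2 ∧
      ((pvAddFractions N D S L).1 : ℚ) / ((pvAddFractions N D S L).2 : ℚ)
        = (N : ℚ) / D + (S : ℚ) / L := by
  obtain ⟨hM, hdD, hdL⟩ := pvLcm_pos_dvd D L hD hL
  obtain ⟨u, hu⟩ := hdD
  obtain ⟨v, hv⟩ := hdL
  have hu' : PySem.Int.floordiv (pvLcm D L) D = u := by
    rw [PySem.Int.floordiv_eq_ediv_of_pos hD, hu, Int.mul_ediv_cancel_left _ hD.ne']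
  have hv' : PySem.Int.floordiv (pvLcm D L) L = v := by
    rw [PySem.Int.floordiv_eq_ediv_of_pos hL, hv, Int.mul_ediv_cancel_left _ hL.ne']
  unfold pvAddFractions
  simp only [hu', hv']
  refine ⟨hM, ?_⟩
  have hMQ : ((pvLcm D L : Int) : ℚ) ≠ 0 := by exact_mod_cast hM.ne'
  have hDQ : ((D : Int) : ℚ) ≠ 0 := by exact_mod_cast hD.ne'
  have hLQ : ((L : Int) : ℚ) ≠ 0 := by exact_mod_cast hL.ne'
  have huQ : ((pvLcm D L : Int) : ℚ) = (D : ℚ) * (u : ℚ) := by exact_mod_cast congrArg (fun z : Int => (z : ℚ)) hu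
  have hvQ : ((pvLcm D L : Int) : ℚ) = (L : ℚ) * (v : ℚ) := by exact_mod_cast congrArg (fun z : Int => (z : ℚ)) hv
  push_cast
  field_simp
  linear_combination (-(N : ℚ) * (L : ℚ)) * huQ + (-(S : ℚ) * (D : ℚ)) * hvQ

theorem cast_map_sum (l : List Int) (f : Int → Int) :
    (((l.map f).sum : Int) : ℚ) = (l.map (fun x => ((f x : Int) : ℚ))).sum := by
  induction l with
  | nil => simp
  | cons x t ih => simp [ih]

theorem div_map_sum (l : List Int) (f : Int → ℚ) (b : ℚ) :
    (l.map f).sum / b = (l.map (fun x => f x / b)).sum := by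
  induction l with
  | nil => simp
  | cons x t ih => simp [add_div, ih]

theorem sum_range_list (m : Nat) (f : Nat → ℚ) :
    ((List.range m).map f).sum = ∑ x ∈ Finset.range m, f x := by
  induction m with
  | zero => simp
  | succ k ih => rw [List.range_succ, Finset.sum_range_succ]; simp [ih]

theorem sym_sum (m : Nat) :
    ∑ p ∈ Finset.range m, ∑ q ∈ Finset.range m, ((q : ℚ) + 1) / ((p : ℚ) + (q : ℚ) + 2)
      = (m : ℚ) ^ 2 / 2 := by
  have hswap : (∑ p ∈ Finset.range m, ∑ q ∈ Finset.range m, ((q : ℚ) + 1) / ((p : ℚ) + (q : ℚ) + 2))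
      = ∑ p ∈ Finset.range m, ∑ q ∈ Finset.range m, ((p : ℚ) + 1) / ((p : ℚ) + (q : ℚ) + 2) := by
    rw [Finset.sum_comm]
    refine Finset.sum_congr rfl (fun p _ => ?_)
    refine Finset.sum_congr rfl (fun q _ => ?_)
    ring_nf
  have hone : (∑ _p ∈ Finset.range m, ∑ _q ∈ Finset.range m, (1 : ℚ)) = (m : ℚ) ^ 2 := by
    simp [Finset.sum_const, Finset.card_range]
    ring
  have hdouble :
      (∑ p ∈ Finset.range m, ∑ q ∈ Finset.range m, ((q : ℚ) + 1) / ((p : ℚ) + (q : ℚ) + 2))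
        + (∑ p ∈ Finset.range m, ∑ q ∈ Finset.range m, ((q : ℚ) + 1) / ((p : ℚ) + (q : ℚ) + 2))
      = (m : ℚ) ^ 2 := by
    nth_rewrite 2 [hswap]
    rw [← hone, ← Finset.sum_add_distrib]
    refine Finset.sum_congr rfl (fun p _ => ?_)
    rw [← Finset.sum_add_distrib]
    refine Finset.sum_congr rfl (fun q _ => ?_)
    have hne : ((p : ℚ) + (q : ℚ) + 2) ≠ 0 := by positivity
    field_simp
    ring
  linarith

theorem rowBody_val (n i : Int) (hn : 1 ≤ n) (hi : 1 ≤ i) (acc : Int × Int) (hacc : 0 < acc.2) :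
    0 < (pvRowBody n acc i).2 ∧
      ((pvRowBody n acc i).1 : ℚ) / ((pvRowBody n acc i).2 : ℚ)
        = (acc.1 : ℚ) / acc.2
          + ((PySem.List.pyRange 1 (n + 1) 1).map (fun j : Int => (j : ℚ) / ((i : ℚ) + (j : ℚ)))).sum := by
  have hcons : PySem.List.pyRange 1 (n + 1) 1 = 1 :: PySem.List.pyRange 2 (n + 1) 1 :=
    PySem.List.pyRange_one_cons (by omega)
  have hlen : (PySem.List.pyRange 1 (n + 1) 1).length = n.toNat := by
    rw [PySem.List.length_pyRange_one]; omega
  set L := ((PySem.List.pyRange 2 (n + 1) 1).map (fun j => i + j)).foldl pvLcm (i + 1) with hLdef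
  obtain ⟨hLpos, hLhead, hLtail⟩ :=
    foldl_pvLcm ((PySem.List.pyRange 2 (n + 1) 1).map (fun j => i + j)) (i + 1) (by omega)
      (by
        intro x hx
        obtain ⟨j, hj, rfl⟩ := List.mem_map.1 hx
        have := (PySem.List.mem_pyRange_one.1 hj).1
        omega)
  have hdvd : ∀ j ∈ PySem.List.pyRange 1 (n + 1) 1, (i + j) ∣ L := by
    intro j hj
    rw [hcons] at hj
    rcases List.mem_cons.1 hj with rfl | hj'
    · exact hLhead
    · exact hLtail _ (List.mem_map_of_mem hj')
  have hbody : pvRowBody n acc i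
      = pvAddFractions acc.1 acc.2
          (((PySem.List.pyRange 1 (n + 1) 1).map
              (fun x => x * PySem.Int.floordiv L (i + x))).sum) L := by
    simp only [pvRowBody]
    rw [← hlen, List.map_id']
    rw [zip3_map (PySem.List.pyRange 1 (n + 1) 1) (fun colNum => i + colNum) _
        (fun ndl => (ndl.1 * PySem.Int.floordiv ndl.2.2 ndl.2.1, ndl.2.2))]
    conv_lhs => rw [hcons]
    simp only [List.map_cons]
    rw [pairFold]
    simp only [List.map_map, Function.comp_def]
    rw [hcons]
    simp [List.sum_cons, hLdef]
  obtain ⟨h1, h2⟩ := addFrac_val acc.1 acc.2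
    (((PySem.List.pyRange 1 (n + 1) 1).map
        (fun x => x * PySem.Int.floordiv L (i + x))).sum) L hacc hLpos
  rw [hbody]
  refine ⟨h1, ?_⟩
  rw [h2]
  congr 1
  rw [cast_map_sum, div_map_sum]
  refine congrArg List.sum (List.map_congr_left ?_)
  intro x hx
  have hx1 := PySem.List.mem_pyRange_one.1 hx
  have hpos : (0 : Int) < i + x := by omega
  obtain ⟨w, hw⟩ := hdvd x hx
  have hwne : (w : ℚ) ≠ 0 := by
    have : w ≠ 0 := by
      intro h0
      rw [h0, mul_zero] at hw
      omega
    exact_mod_cast this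
  have hixne : ((i : ℚ) + (x : ℚ)) ≠ 0 := by
    have : ((i + x : Int) : ℚ) ≠ 0 := by exact_mod_cast hpos.ne'
    push_cast at this
    exact this
  rw [PySem.Int.floordiv_eq_ediv_of_pos hpos, hw, Int.mul_ediv_cancel_left _ hpos.ne']
  push_cast
  field_simp

theorem loop_inv (n : Int) (hn : 1 ≤ n) (l : List Int) (hl : ∀ i ∈ l, 1 ≤ i) :
    ∀ acc : Int × Int, 0 < acc.2 →
    0 < (l.foldl (pvRowBody n) acc).2 ∧
      (((l.foldl (pvRowBody n) acc).1 : ℚ)) / (((l.foldl (pvRowBody n) acc).2 : ℚ))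
        = (acc.1 : ℚ) / acc.2
          + (l.map (fun i : Int => ((PySem.List.pyRange 1 (n + 1) 1).map
              (fun j : Int => (j : ℚ) / ((i : ℚ) + (j : ℚ)))).sum)).sum := by
  revert hl
  induction l with
  | nil => intro _ acc hacc; simp [hacc]
  | cons i t ih =>
    intro hl acc hacc
    have hi := hl i (by simp)
    obtain ⟨h1, h2⟩ := rowBody_val n i hn hi acc hacc
    obtain ⟨h3, h4⟩ := ih (fun x hx => hl x (by simp [hx])) (pvRowBody n acc i) h1
    rw [List.foldl_cons]
    refine ⟨h3, ?_⟩
    rw [h4, h2]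
    simp [add_assoc]

theorem total_sum (n : Int) (hn : 1 ≤ n) :
    ((PySem.List.pyRange 1 (n + 1) 1).map (fun i : Int => ((PySem.List.pyRange 1 (n + 1) 1).map
        (fun j : Int => (j : ℚ) / ((i : ℚ) + (j : ℚ)))).sum)).sum = (n : ℚ) ^ 2 / 2 := by
  have hnm : ((n.toNat : ℚ)) = (n : ℚ) := by
    have : ((n.toNat : Int)) = n := Int.toNat_of_nonneg (by omega)
    exact_mod_cast this
  rw [PySem.List.pyRange_one]
  rw [show (n + 1 - 1 : Int).toNat = n.toNat from by omega]
  rw [List.map_map, sum_range_list, ← hnm, ← sym_sum n.toNat]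
  refine Finset.sum_congr rfl (fun p _ => ?_)
  simp only [Function.comp_apply, List.map_map]
  rw [sum_range_list]
  refine Finset.sum_congr rfl (fun q _ => ?_)
  simp only [Function.comp_apply]
  push_cast
  ring_nf

theorem final_reduce (n N D : Int) (hn : 1 ≤ n) (hD : 0 < D) (h : 2 * N = n ^ 2 * D) :
    (let divisor : Int := Int.gcd N D
     let numerator := if divisor > 1 then PySem.Int.floordiv N divisor else N
     let denominator := if divisor > 1 then PySem.Int.floordiv D divisor else D
     if numerator = 0 ∨ denominator = 1 then [numerator] else [numerator, denominator])
      = game2_alt n := by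
  have hg0 : Int.gcd N D ≠ 0 := by
    simp only [ne_eq, Int.gcd_eq_zero_iff, not_and]
    intro _; omega
  set g := Int.gcd N D with hgdef
  have hg : (0 : Int) < (g : Int) := by exact_mod_cast Nat.pos_of_ne_zero hg0
  obtain ⟨N0, hN0⟩ : ((g : Int)) ∣ N := hgdef ▸ Int.gcd_dvd_left N D
  obtain ⟨D0, hD0⟩ : ((g : Int)) ∣ D := hgdef ▸ Int.gcd_dvd_right N D
  have hD0pos : 0 < D0 := by nlinarith
  have hcop : Int.gcd N0 D0 = 1 := by
    have hq1 : N / (g : Int) = N0 := by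
      rw [hN0, Int.mul_ediv_cancel_left _ hg.ne']
    have hq2 : D / (g : Int) = D0 := by
      rw [hD0, Int.mul_ediv_cancel_left _ hg.ne']
    have hgg := Int.gcd_div_gcd_div_gcd (i := N) (j := D) (Nat.pos_of_ne_zero hg0)
    rw [← hgdef] at hgg
    rwa [hq1, hq2] at hgg
  have hmain : 2 * N0 = n ^ 2 * D0 := by
    have h' := h
    rw [hN0, hD0] at h'
    have h'' : (g : Int) * (2 * N0) = (g : Int) * (n ^ 2 * D0) := by linear_combination h'
    exact mul_left_cancel₀ hg.ne' h''
  have hdvd2 : D0 ∣ 2 := by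
    have h1 : D0 ∣ 2 * N0 := ⟨n ^ 2, by linarith⟩
    have hco : IsCoprime (D0 : Int) N0 := (Int.isCoprime_iff_gcd_eq_one.mpr hcop).symm
    exact hco.dvd_of_dvd_mul_right h1
  have hD0le : D0 ≤ 2 := Int.le_of_dvd (by norm_num) hdvd2
  have hnum : (if ((g : Int)) > 1 then PySem.Int.floordiv N g else N) = N0 := by
    by_cases hgt : ((g : Int)) > 1
    · rw [if_pos hgt, PySem.Int.floordiv_eq_ediv_of_pos hg, hN0,
        Int.mul_ediv_cancel_left _ hg.ne']
    · have hg1 : ((g : Int)) = 1 := by omega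
      rw [if_neg hgt, hN0, hg1, one_mul]
  have hden : (if ((g : Int)) > 1 then PySem.Int.floordiv D g else D) = D0 := by
    by_cases hgt : ((g : Int)) > 1
    · rw [if_pos hgt, PySem.Int.floordiv_eq_ediv_of_pos hg, hD0,
        Int.mul_ediv_cancel_left _ hg.ne']
    · have hg1 : ((g : Int)) = 1 := by omega
      rw [if_neg hgt, hD0, hg1, one_mul]
  simp only [hnum, hden]
  interval_cases D0
  · -- D0 = 1 : n is even, result [N0] with 2 * N0 = n ^ 2
    have heven : PySem.Int.mod n 2 = 0 := by
      rw [PySem.Int.mod_eq_emod_of_pos (by norm_num)]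
      have hsq : Even (n ^ 2) := ⟨N0, by linarith⟩
      obtain ⟨t, ht⟩ := (Int.even_pow.mp hsq).1
      omega
    rw [if_pos (Or.inr rfl)]
    unfold game2_alt
    rw [if_neg (by omega), if_pos heven]
    have hval : PySem.Int.floordiv (n * n) 2 = N0 := by
      rw [PySem.Int.floordiv_eq_ediv_of_pos (by norm_num)]
      have h2 : 2 * N0 = n * n := by nlinarith
      generalize hm : n * n = m at h2 ⊢
      omega
    rw [hval]
  · -- D0 = 2 : n is odd, result [N0, 2] with N0 = n ^ 2
    have hN0n : N0 = n ^ 2 := by linarith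
    have hodd : ¬ PySem.Int.mod n 2 = 0 := by
      rw [PySem.Int.mod_eq_emod_of_pos (by norm_num)]
      intro hmod
      obtain ⟨t, ht⟩ : (2 : Int) ∣ n := by omega
      have h2N : (2 : Int) ∣ N0 := ⟨2 * t * t, by rw [hN0n, ht]; ring⟩
      have h2g := Int.dvd_gcd h2N (dvd_refl (2 : Int))
      rw [hcop] at h2g
      norm_num at h2g
    have hN0pos : 0 < N0 := by
      rw [hN0n]
      positivity
    have hcond : ¬ (N0 = 0 ∨ (2 : Int) = 1) := by
      push_neg
      exact ⟨by omega, by norm_num⟩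
    rw [if_neg hcond]
    unfold game2_alt
    rw [if_neg (by omega), if_neg hodd]
    have hval : n * n = N0 := by rw [hN0n]; ring
    rw [hval]

-- ===== VERDICT (by name: the statement is the Claim_ definition above) =====
theorem game2_spec : Claim_equal_game2 := by
  intro n _
  unfold Spec_game2 game2
  by_cases hn : 1 ≤ n
  · have hl : ∀ i ∈ PySem.List.pyRange 1 (n + 1) 1, (1 : Int) ≤ i := by
      intro i hi
      exact ((PySem.List.mem_pyRange_one).1 hi).1
    obtain ⟨hD, hval⟩ := loop_inv n hn (PySem.List.pyRange 1 (n + 1) 1) hl (0, 1) (by norm_num)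
    set r := (PySem.List.pyRange 1 (n + 1) 1).foldl (pvRowBody n) (0, 1) with hr
    rw [total_sum n hn] at hval
    have hDQ : ((r.2 : ℚ)) ≠ 0 := by exact_mod_cast hD.ne'
    have h2 : (2 : ℚ) * r.1 = (n : ℚ) ^ 2 * r.2 := by
      field_simp at hval
      push_cast at hval
      linarith [hval]
    have hint : 2 * r.1 = n ^ 2 * r.2 := by exact_mod_cast h2
    exact final_reduce n r.1 r.2 hn hD hint
  · push_neg at hn
    have : PySem.List.pyRange 1 (n + 1) 1 = [] := PySem.List.pyRange_one_eq_nil (by omega)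
    rw [this]
    simp only [List.foldl_nil]
    norm_num [game2_alt, Int.gcd]
    omega
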